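-- pv_equiv track=rewrite | github.com/caseyhartnett/TheKilnGod | lib/telemetry_math.py | switch_count
-- ===== SOURCE A (Python) =====
-- def switch_count(binary_values):
--     if len(binary_values) <= 1:
--         return 0
--     count = 0
--     prev = 1 if binary_values[0] else 0
--     for value in binary_values[1:]:
--         now = 1 if value else 0
--         if now != prev:
--             count += 1
--         prev = now
--     return count
-- ===== SOURCE B (Python) =====
-- from itertools import groupby
--
-- def switch_count(binary_values):
--     if len(binary_values) <= 1:
--         return 0
--     runs = sum(1 for _ in groupby(binary_values, key=bool))
--     return runs - 1
-- ===== Notes on version B (the rewrite author's own statement) =====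
-- stated objective: idiomatic
-- what changed: B collapses the sequence into maximal runs of equal truthiness with itertools.groupby and returns runs-1, instead of A's rolling prev/now comparison with a counter.
import Mathlib
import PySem

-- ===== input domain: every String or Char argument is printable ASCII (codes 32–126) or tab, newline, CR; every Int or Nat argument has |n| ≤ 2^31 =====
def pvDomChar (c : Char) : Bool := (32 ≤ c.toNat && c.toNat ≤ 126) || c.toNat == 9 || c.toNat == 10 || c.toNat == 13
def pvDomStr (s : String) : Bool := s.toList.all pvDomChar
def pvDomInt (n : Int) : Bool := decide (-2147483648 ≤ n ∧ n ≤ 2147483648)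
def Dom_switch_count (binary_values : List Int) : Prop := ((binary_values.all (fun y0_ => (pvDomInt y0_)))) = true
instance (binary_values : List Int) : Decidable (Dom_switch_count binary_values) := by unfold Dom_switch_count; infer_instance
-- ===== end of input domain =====

-- B counts maximal runs of equal truthiness (groupby) and returns runs-1 instead of A's rolling prev/now counter; objective: idiomatic, same cost.

-- ===== PORT A =====
-- A's for-loop over binary_values[1:], carrying (prev, count)
def switchLoopA : List Int → Int → Int → Int
  | [], _, count => count
  | v :: rest, prev, count =>
      let now : Int := if v ≠ 0 then 1 else 0
      switchLoopA rest now (if now ≠ prev then count + 1 else count)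

def switch_count (binary_values : List Int) : Int :=
  if binary_values.length ≤ 1 then 0
  else
    match binary_values with
    | [] => 0
    | x :: rest => switchLoopA rest (if x ≠ 0 then 1 else 0) 0

-- ===== PORT B =====
-- sum(1 for _ in groupby(..., key=bool)): count maximal runs of equal booleans
def runCount : List Bool → Nat
  | [] => 0
  | a :: rest => 1 + runCount (rest.dropWhile (· == a))
termination_by l => l.length
decreasing_by
  exact Nat.lt_succ_of_le (List.length_dropWhile_le _ _)

def switch_count_alt (binary_values : List Int) : Int :=
  if binary_values.length ≤ 1 then 0
  else (runCount (binary_values.map (fun v => decide (v ≠ 0))) : Int) - 1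

-- ===== PRECONDITION & SPEC =====
def Spec_switch_count (binary_values : List Int) (out : Int) : Prop := out = switch_count_alt binary_values
instance (binary_values : List Int) (out : Int) : Decidable (Spec_switch_count binary_values out) := by unfold Spec_switch_count; infer_instance

-- ===== CLAIM (what is proved, stated in full; the proofs are below) =====
def Claim_equal_switch_count : Prop := ∀ (binary_values : List Int), Dom_switch_count binary_values → Spec_switch_count binary_values (switch_count binary_values)

-- ===== LEMMAS AND PROOFS =====
-- transitions of a bool list given the previous value
def swB : Bool → List Bool → Nat
  | _, [] => 0
  | p, q :: l => (if q ≠ p then 1 else 0) + swB q l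

theorem runCount_cons_cons_eq (a : Bool) (l : List Bool) :
    runCount (a :: a :: l) = runCount (a :: l) := by
  conv_lhs => rw [runCount]
  conv_rhs => rw [runCount]
  simp [List.dropWhile]

theorem runCount_eq_swB (l : List Bool) (p : Bool) :
    runCount (p :: l) = 1 + swB p l := by
  induction l generalizing p with
  | nil => simp [runCount, swB]
  | cons q l ih =>
      by_cases h : q = p
      · subst h
        rw [runCount_cons_cons_eq, ih q]
        simp [swB]
      · conv_lhs => rw [runCount]
        have hb : (q == p) = false := by simp [h]
        have hd : (q :: l).dropWhile (· == p) = q :: l := by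
          simp [List.dropWhile, hb]
        rw [hd, ih q]
        simp [swB, h]

theorem switchLoopA_eq_swB (rest : List Int) (p : Bool) (count : Int) :
    switchLoopA rest (if p then 1 else 0) count
      = count + (swB p (rest.map (fun v => decide (v ≠ 0))) : Int) := by
  induction rest generalizing p count with
  | nil => simp [switchLoopA, swB]
  | cons v rest ih =>
      by_cases hv : v = 0
      · subst hv
        have := ih false (if (false : Bool) ≠ p then count + 1 else count)
        simp [switchLoopA] at this ⊢
        cases p <;> simp_all [swB] <;> push_cast <;> ring
      · have := ih true (if (true : Bool) ≠ p then count + 1 else count)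
        simp [switchLoopA, hv] at this ⊢
        cases p <;> simp_all [swB] <;> push_cast <;> ring

-- ===== VERDICT (by name: the statement is the Claim_ definition above) =====
theorem switch_count_spec : Claim_equal_switch_count := by
  intro bv _
  unfold Spec_switch_count
  match bv with
  | [] => simp [switch_count, switch_count_alt]
  | [x] => simp [switch_count, switch_count_alt]
  | x :: y :: rest =>
      have hlen : ¬ (x :: y :: rest).length ≤ 1 := by simp
      by_cases hx : x = 0
      · have hA := switchLoopA_eq_swB (y :: rest) false 0
        subst hx
        simp only [switch_count, switch_count_alt, hlen, if_false, List.map_cons]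
        simp only [Bool.false_eq_true, if_false] at hA
        simp only [ne_eq, not_true_eq_false, if_false, decide_not, decide_true,
          Bool.not_true, hA, runCount_eq_swB]
        simp
      · have hA := switchLoopA_eq_swB (y :: rest) true 0
        simp only [switch_count, switch_count_alt, hlen, if_false, List.map_cons]
        simp only [if_true] at hA
        simp only [ne_eq, hx, not_false_eq_true, if_true, decide_not,
          decide_eq_false_iff_not, hA, runCount_eq_swB]
        simp [hx]
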